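-- pv_equiv track=rewrite | github.com/Ed0827/mrf-extractor | bcbs_sj.py | norm_codes
-- ===== SOURCE A (Python) =====
-- from typing import List, Tuple, Optional
--
-- def norm_codes(codes_arg: Optional[List[str]]) -> Optional[set]:
--     if not codes_arg:
--         return None
--     s = set()
--     for tok in codes_arg:
--         for c in tok.replace(",", " ").split():
--             if c:
--                 s.add(str(c).strip())
--     return s
-- ===== SOURCE B (Python) =====
-- def norm_codes(codes_arg):
--     if not codes_arg:
--         return None
--     s = set()
--     for tok in codes_arg:
--         cur = []
--         for ch in tok:
--             if ch == "," or ch.isspace():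
--                 if cur:
--                     s.add("".join(cur))
--                     cur = []
--             else:
--                 cur.append(ch)
--         if cur:
--             s.add("".join(cur))
--     return s
-- ===== Notes on version B (the rewrite author's own statement) =====
-- stated objective: alternative
-- what changed: Replaces A's per-token replace(',',' ')+split() string pipeline with a single-pass character-level scanner that accumulates each word and adds it to the set when a delimiter (comma or whitespace) or end of token is reached.
import Mathlib
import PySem

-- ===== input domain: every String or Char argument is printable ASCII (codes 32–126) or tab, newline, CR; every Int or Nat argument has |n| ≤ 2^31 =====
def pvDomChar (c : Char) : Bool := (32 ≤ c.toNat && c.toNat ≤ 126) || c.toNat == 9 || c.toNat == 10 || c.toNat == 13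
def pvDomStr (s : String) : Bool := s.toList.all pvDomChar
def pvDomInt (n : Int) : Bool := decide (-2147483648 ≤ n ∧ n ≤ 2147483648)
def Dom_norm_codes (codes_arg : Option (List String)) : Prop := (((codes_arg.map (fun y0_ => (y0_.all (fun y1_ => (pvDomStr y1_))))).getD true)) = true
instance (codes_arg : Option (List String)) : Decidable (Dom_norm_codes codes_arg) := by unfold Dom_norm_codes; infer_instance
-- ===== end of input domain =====

-- B replaces A's replace-then-split string pipeline by a single-pass character-level
-- scanner that builds each word incrementally and adds it to the set when a delimiter
-- (',' or whitespace) or the end of the token is reached (alternative algorithm,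
-- return value only).

-- ===== PORT A =====
def norm_codes (codes_arg : Option (List String)) : Option (List String) :=
  match codes_arg with
  | none => none                      -- `if not codes_arg` is true for None …
  | some codes =>
    if codes.isEmpty then none        -- … and for the empty list
    else some (codes.foldl (fun s tok =>
        (PySem.Str.split₀ (PySem.Str.replace tok "," " ")).foldl
          (fun s c => if c ≠ "" then PySem.Set.add s (PySem.Str.strip c) else s) s)
      PySem.Set.empty)

-- ===== PORT B =====
-- the inner `for ch in tok` loop of Source B: state = (cur, s); flush of `cur` at the end
def altScanTok : List Char → List Char → PySem.Set String → PySem.Set String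
  | [], cur, s => if cur.isEmpty then s else PySem.Set.add s (String.ofList cur)
  | ch :: t, cur, s =>
    if ch = ',' || PySem.Chars.isspace ch then
      if cur.isEmpty then altScanTok t [] s
      else altScanTok t [] (PySem.Set.add s (String.ofList cur))
    else altScanTok t (cur ++ [ch]) s

def norm_codes_alt (codes_arg : Option (List String)) : Option (List String) :=
  match codes_arg with
  | none => none
  | some codes =>
    if codes.isEmpty then none
    else some (codes.foldl (fun s tok => altScanTok tok.toList [] s) PySem.Set.empty)

-- ===== PRECONDITION & SPEC =====
def Spec_norm_codes (codes_arg : Option (List String)) (out : Option (List String)) : Prop := out = norm_codes_alt codes_arg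
instance (codes_arg : Option (List String)) (out : Option (List String)) : Decidable (Spec_norm_codes codes_arg out) := by unfold Spec_norm_codes; infer_instance

-- ===== CLAIM (what is proved, stated in full; the proofs are below) =====
def Claim_equal_norm_codes : Prop := ∀ (codes_arg : Option (List String)), Dom_norm_codes codes_arg → Spec_norm_codes codes_arg (norm_codes codes_arg)

-- ===== LEMMAS AND PROOFS =====
def charmap (c : Char) : Char := if c = ',' then ' ' else c

theorem go_repl (l : List Char) : ∀ (fuel : Nat) (acc : List Char), l.length ≤ fuel →
    PySem.Chars.replace.go [','] [' '] fuel l acc = acc.reverse ++ l.map charmap := by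
  induction l with
  | nil => intro fuel acc h; cases fuel <;> simp [PySem.Chars.replace.go]
  | cons c t ih =>
    intro fuel acc h
    cases fuel with
    | zero => simp at h
    | succ f =>
      simp only [PySem.Chars.replace.go, List.isPrefixOf]
      by_cases hc : c = ','
      · simp [hc, ih f _ (by simpa using h), charmap]
      · simp [hc, ih f _ (by simpa using h), charmap]
        intro h2; exact absurd h2.symm hc

theorem replace_single (l : List Char) :
    PySem.Chars.replace l [','] [' '] = l.map charmap := by
  simp [PySem.Chars.replace, go_repl l l.length [] le_rfl]

theorem go_nil (cur : List Char) (acc : List (List Char)) : PySem.Chars.split₀.go [] cur acc =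
    if cur.isEmpty then acc.reverse else (cur.reverse :: acc).reverse := by
  by_cases h : cur.isEmpty <;> simp [PySem.Chars.split₀.go, h]

theorem go_cons_space {c : Char} (hc : PySem.Chars.isspace c = true) (t cur acc) :
    PySem.Chars.split₀.go (c :: t) cur acc =
      if cur.isEmpty then PySem.Chars.split₀.go t [] acc
      else PySem.Chars.split₀.go t [] (cur.reverse :: acc) := by
  by_cases h : cur.isEmpty <;> simp [PySem.Chars.split₀.go, hc, h]

theorem go_cons_nonspace {c : Char} (hc : PySem.Chars.isspace c = false) (t cur acc) :
    PySem.Chars.split₀.go (c :: t) cur acc = PySem.Chars.split₀.go t (c :: cur) acc := by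
  simp [PySem.Chars.split₀.go, hc]

theorem go_acc (l : List Char) : ∀ cur acc, PySem.Chars.split₀.go l cur acc =
    acc.reverse ++ PySem.Chars.split₀.go l cur [] := by
  induction l with
  | nil => intro cur acc; rw [go_nil, go_nil]; by_cases h : cur.isEmpty <;> simp [h]
  | cons c t ih =>
    intro cur acc
    cases hs : PySem.Chars.isspace c with
    | true =>
      rw [go_cons_space hs, go_cons_space hs]
      by_cases h : cur.isEmpty
      · rw [if_pos h, if_pos h, ih [] acc]
      · rw [if_neg h, if_neg h, ih [] (cur.reverse :: acc), ih [] [cur.reverse]]; simp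
    | false => rw [go_cons_nonspace hs, go_cons_nonspace hs, ih (c :: cur) acc]

theorem go_words (l : List Char) : ∀ (cur : List Char) (acc : List (List Char)),
    (∀ c ∈ cur, PySem.Chars.isspace c = false) →
    (∀ w ∈ acc, w ≠ [] ∧ ∀ c ∈ w, PySem.Chars.isspace c = false) →
    ∀ w ∈ PySem.Chars.split₀.go l cur acc, w ≠ [] ∧ ∀ c ∈ w, PySem.Chars.isspace c = false := by
  induction l with
  | nil =>
    intro cur acc hcur hacc w hw
    rw [go_nil] at hw
    by_cases h : cur.isEmpty
    · rw [if_pos h] at hw; exact hacc w (by simpa using hw)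
    · rw [if_neg h] at hw
      simp only [List.mem_reverse, List.mem_cons] at hw
      rcases hw with hw | hw
      · subst hw
        refine ⟨by simpa [List.isEmpty_iff] using h, ?_⟩
        intro c hc; exact hcur c (by simpa using hc)
      · exact hacc w hw
  | cons c t ih =>
    intro cur acc hcur hacc w hw
    cases hs : PySem.Chars.isspace c with
    | true =>
      rw [go_cons_space hs] at hw
      by_cases h : cur.isEmpty
      · rw [if_pos h] at hw; exact ih [] acc (by simp) hacc w hw
      · rw [if_neg h] at hw
        refine ih [] _ (by simp) ?_ w hw
        intro v hv
        rcases List.mem_cons.mp hv with hv | hv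
        · subst hv
          exact ⟨by simpa [List.isEmpty_iff] using h, fun d hd => hcur d (by simpa using hd)⟩
        · exact hacc v hv
    | false =>
      rw [go_cons_nonspace hs] at hw
      refine ih (c :: cur) acc ?_ hacc w hw
      intro d hd
      rcases List.mem_cons.mp hd with hd | hd
      · subst hd; exact hs
      · exact hcur d hd

theorem split₀_words (l : List Char) :
    ∀ w ∈ PySem.Chars.split₀ l, w ≠ [] ∧ ∀ c ∈ w, PySem.Chars.isspace c = false :=
  go_words l [] [] (by simp) (by simp)

theorem strip_id (w : List Char) (h : ∀ c ∈ w, PySem.Chars.isspace c = false) :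
    PySem.Chars.strip w = w := by
  have h1 : PySem.Chars.lstrip w = w := by
    simp only [PySem.Chars.lstrip]
    exact List.dropWhile_eq_self_iff.mpr (by cases w with
      | nil => simp
      | cons a t => simpa using h a (by simp))
  rw [PySem.Chars.strip, h1, PySem.Chars.rstrip]
  rw [List.dropWhile_eq_self_iff.mpr (by cases hw : w.reverse with
    | nil => simp
    | cons a t =>
      have : a ∈ w := by
        have : a ∈ w.reverse := by simp [hw]
        simpa using this
      simpa [hw] using h a this)]
  simp

theorem str_split_words (t : String) :
    ∀ c ∈ PySem.Str.split₀ (PySem.Str.replace t "," " "), c ≠ "" ∧ PySem.Str.strip c = c := by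
  intro c hc
  simp only [PySem.Str.split₀, List.mem_map] at hc
  obtain ⟨w, hw, rfl⟩ := hc
  have hp := split₀_words _ w hw
  constructor
  · intro h
    apply hp.1
    have := congrArg String.toList h
    simpa using this
  · rw [PySem.Str.strip]
    have : (String.ofList w).toList = w := by simp
    rw [this, strip_id w hp.2]

theorem inner_fold (ws : List String) (h : ∀ c ∈ ws, c ≠ "" ∧ PySem.Str.strip c = c) :
    ∀ s, ws.foldl (fun s c => if c ≠ "" then PySem.Set.add s (PySem.Str.strip c) else s) s =
      ws.foldl PySem.Set.add s := by
  induction ws with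
  | nil => intro s; rfl
  | cons c t ih =>
    intro s
    have hc := h c (by simp)
    simp only [List.foldl_cons, if_pos hc.1, hc.2]
    exact ih (fun d hd => h d (by simp [hd])) _

theorem isspace_charmap (c : Char) :
    PySem.Chars.isspace (charmap c) = (c = ',' || PySem.Chars.isspace c) := by
  by_cases hc : c = ','
  · simp [charmap, hc]; decide
  · simp [charmap, hc]

theorem scan_eq (l : List Char) : ∀ cur s, altScanTok l cur s =
    (PySem.Chars.split₀.go (l.map charmap) cur.reverse []).foldl
      (fun s w => PySem.Set.add s (String.ofList w)) s := by
  induction l with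
  | nil =>
    intro cur s
    cases cur with
    | nil => simp [altScanTok, go_nil]
    | cons a as => simp [altScanTok, go_nil]
  | cons c t ih =>
    intro cur s
    rw [List.map_cons]
    cases hd : (decide (c = ',') || PySem.Chars.isspace c) with
    | true =>
      rw [go_cons_space (by rw [isspace_charmap]; simpa using hd)]
      cases cur with
      | nil =>
        have e : altScanTok (c :: t) [] s = altScanTok t [] s := by
          simp [altScanTok, hd]
        rw [e, ih [] s]
        simp
      | cons a as =>
        have e : altScanTok (c :: t) (a :: as) s
            = altScanTok t [] (PySem.Set.add s (String.ofList (a :: as))) := by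
          simp [altScanTok, hd]
        rw [e, ih [] _]
        rw [if_neg (by simp), List.reverse_reverse,
          go_acc (List.map charmap t) [] [a :: as]]
        simp
    | false =>
      have hns : PySem.Chars.isspace (charmap c) = false := by
        rw [isspace_charmap]; simpa using hd
      rw [go_cons_nonspace hns]
      have hcm : charmap c = c := by
        simp [Bool.or_eq_false_iff] at hd
        simp [charmap, hd.1]
      have e : altScanTok (c :: t) cur s = altScanTok t (cur ++ [c]) s := by
        simp [altScanTok, hd]
      rw [e, ih (cur ++ [c]) s, hcm]
      simp

theorem tok_eq (tok : String) (s : PySem.Set String) :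
    (PySem.Str.split₀ (PySem.Str.replace tok "," " ")).foldl
      (fun s c => if c ≠ "" then PySem.Set.add s (PySem.Str.strip c) else s) s =
    altScanTok tok.toList [] s := by
  rw [inner_fold _ (str_split_words tok)]
  have hl : (PySem.Str.replace tok "," " ").toList = tok.toList.map charmap := by
    rw [PySem.Str.toList_replace]
    have h1 : (",").toList = [','] := rfl
    have h2 : (" ").toList = [' '] := rfl
    rw [h1, h2, replace_single]
  rw [PySem.Str.split₀, hl, List.foldl_map, scan_eq]
  rfl

-- ===== VERDICT (by name: the statement is the Claim_ definition above) =====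
theorem norm_codes_spec : Claim_equal_norm_codes := by
  unfold Claim_equal_norm_codes Spec_norm_codes
  intro codes_arg _
  match codes_arg with
  | none => rfl
  | some codes =>
    simp only [norm_codes, norm_codes_alt]
    by_cases h : codes.isEmpty
    · simp [h]
    · rw [if_neg h, if_neg h]
      apply congrArg some
      have : (fun (s : PySem.Set String) (tok : String) =>
          (PySem.Str.split₀ (PySem.Str.replace tok "," " ")).foldl
            (fun s c => if c ≠ "" then PySem.Set.add s (PySem.Str.strip c) else s) s)
          = fun s tok => altScanTok tok.toList [] s :=
        funext fun s => funext fun tok => tok_eq tok s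
      rw [this]
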